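-- pv_equiv track=rewrite | github.com/alexey-luhinin/Otus_python | Task_1/main.py | even_odd_prime
-- ===== SOURCE A (Python) =====
-- from typing import List
--
-- def even_odd_prime(numbers: List[int], type_of_out='prime') -> List[int]:
--     '''Takes list of intergers and returns filtered numbers
--        by type[prime, odd, even]'''
--
--     if type_of_out == 'even':
--         return list(filter(lambda x: x % 2 == 0, numbers))
--
--     if type_of_out == 'odd':
--         return list(filter(lambda x: x % 2 != 0, numbers))
--
--     if type_of_out == 'prime':
--         primes = []
--         for number in numbers:
--             if number <= 1:
--                 continue
--             for i in range(2, number):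
--                 if number % i == 0:
--                     break
--             else:
--                 primes.append(number)
--         return primes
--
--     return None
-- ===== SOURCE B (Python) =====
-- from typing import List
--
-- def even_odd_prime(numbers: List[int], type_of_out='prime') -> List[int]:
--     '''Takes list of integers and returns filtered numbers
--        by type[prime, odd, even]'''
--
--     if type_of_out == 'even':
--         return [x for x in numbers if x % 2 == 0]
--
--     if type_of_out == 'odd':
--         return [x for x in numbers if x % 2 != 0]
--
--     if type_of_out == 'prime':
--         return [n for n in numbers if _is_prime(n)]
--
--     return None
--
-- def _is_prime(n):
--     if n <= 1:
--         return False
--     i = 2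
--     while i * i <= n:
--         if n % i == 0:
--             return False
--         i += 1
--     return True
-- ===== Notes on version B (the rewrite author's own statement) =====
-- stated objective: alternative
-- what changed: The prime branch tests each number by trial division only up to its square root (while i*i <= n) inside a list comprehension, instead of A's for/else loop that divides by every i in range(2, n).
import Mathlib
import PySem

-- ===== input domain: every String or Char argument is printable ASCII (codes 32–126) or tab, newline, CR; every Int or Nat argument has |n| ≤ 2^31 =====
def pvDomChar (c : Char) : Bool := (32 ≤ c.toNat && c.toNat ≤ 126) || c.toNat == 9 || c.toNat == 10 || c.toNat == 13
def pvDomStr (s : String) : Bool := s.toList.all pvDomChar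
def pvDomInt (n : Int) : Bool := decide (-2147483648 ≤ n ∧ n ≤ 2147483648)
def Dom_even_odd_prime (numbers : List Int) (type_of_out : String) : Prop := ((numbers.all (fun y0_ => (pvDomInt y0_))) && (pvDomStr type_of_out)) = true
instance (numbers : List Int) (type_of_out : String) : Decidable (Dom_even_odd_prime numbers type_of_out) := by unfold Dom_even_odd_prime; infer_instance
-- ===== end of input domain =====

-- B's prime branch tests each number by trial division up to its square root (while i*i ≤ n) in a comprehension, instead of A's for/else loop over all of range(2, n).

-- ===== PORT A =====
-- inner 'for i in range(2, number): if number % i == 0: break / else:' as a boolean scan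
def pyAnyDiv (number : Int) : Bool :=
  (PySem.List.pyRange 2 number 1).any (fun i => PySem.Int.mod number i == 0)

def even_odd_prime (numbers : List Int) (type_of_out : String) : Option (List Int) :=
  if type_of_out == "even" then
    some (numbers.filter (fun x => PySem.Int.mod x 2 == 0))
  else if type_of_out == "odd" then
    some (numbers.filter (fun x => PySem.Int.mod x 2 != 0))
  else if type_of_out == "prime" then
    some (numbers.foldl (fun primes number =>
      if number ≤ 1 then primes
      else if pyAnyDiv number then primes
      else primes ++ [number]) [])
  else none

-- ===== PORT B =====
-- 'while i * i <= n: if n % i == 0: return False; i += 1'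
def bTrial (n : Int) (i : Int) : Bool :=
  if _h : i * i ≤ n then
    if PySem.Int.mod n i == 0 then false
    else bTrial n (i + 1)
  else true
termination_by (n + 1 - i).toNat
decreasing_by
  have hi : i ≤ n := by nlinarith [sq_nonneg (i - 1), sq_nonneg i]
  omega

def bIsPrime (n : Int) : Bool :=
  if n ≤ 1 then false else bTrial n 2

def even_odd_prime_alt (numbers : List Int) (type_of_out : String) : Option (List Int) :=
  if type_of_out == "even" then
    some (numbers.filter (fun x => PySem.Int.mod x 2 == 0))
  else if type_of_out == "odd" then
    some (numbers.filter (fun x => PySem.Int.mod x 2 != 0))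
  else if type_of_out == "prime" then
    some (numbers.filter bIsPrime)
  else none

-- ===== PRECONDITION & SPEC =====
def Spec_even_odd_prime (numbers : List Int) (type_of_out : String) (out : Option (List Int)) : Prop := out = even_odd_prime_alt numbers type_of_out
instance (numbers : List Int) (type_of_out : String) (out : Option (List Int)) : Decidable (Spec_even_odd_prime numbers type_of_out out) := by unfold Spec_even_odd_prime; infer_instance

-- ===== CLAIM (what is proved, stated in full; the proofs are below) =====
def Claim_equal_even_odd_prime : Prop := ∀ (numbers : List Int) (type_of_out : String), Dom_even_odd_prime numbers type_of_out → Spec_even_odd_prime numbers type_of_out (even_odd_prime numbers type_of_out)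

-- ===== LEMMAS AND PROOFS =====

theorem pyAnyDiv_iff (n : Int) : pyAnyDiv n = true ↔ ∃ i : Int, 2 ≤ i ∧ i < n ∧ i ∣ n := by
  simp only [pyAnyDiv, List.any_eq_true, PySem.List.mem_pyRange_one, beq_iff_eq,
    PySem.Int.mod_eq_zero_iff_dvd]
  constructor
  · rintro ⟨i, ⟨h1, h2⟩, h3⟩; exact ⟨i, h1, h2, h3⟩
  · rintro ⟨i, h1, h2, h3⟩; exact ⟨i, ⟨h1, h2⟩, h3⟩

theorem bTrial_iff (n i : Int) (h2 : 2 ≤ i) :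
    bTrial n i = true ↔ ∀ j : Int, i ≤ j → j * j ≤ n → ¬ j ∣ n := by
  revert h2
  induction i using bTrial.induct (n := n) with
  | case1 i hii hd =>
    intro _h2
    rw [bTrial, dif_pos hii, if_pos hd]
    constructor
    · intro h; exact absurd h (by decide)
    · intro h
      exact absurd ((PySem.Int.mod_eq_zero_iff_dvd n i).mp (by simpa using hd))
        (h i le_rfl hii)
  | case2 i hii hd ih =>
    intro h2
    rw [bTrial, dif_pos hii, if_neg hd]
    have hnd : ¬ i ∣ n := fun hdvd => hd (by simp [(PySem.Int.mod_eq_zero_iff_dvd n i).mpr hdvd])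
    rw [ih (by omega)]
    constructor
    · intro h j hij hjj
      rcases eq_or_lt_of_le hij with rfl | hlt
      · exact hnd
      · exact h j (by omega) hjj
    · intro h j hij hjj
      exact h j (by omega) hjj
  | case3 i hii =>
    intro h2
    rw [bTrial, dif_neg hii]
    constructor
    · intro _ j hij hjj _
      have : (0:Int) ≤ j + i := by omega
      nlinarith [mul_nonneg (sub_nonneg.mpr hij) this]
    · intro _; rfl

-- a divisor in [2, n) exists iff a divisor with j*j ≤ n exists (for n ≥ 2)
theorem divisor_small (n : Int) (hn : 2 ≤ n) :
    (∃ i : Int, 2 ≤ i ∧ i < n ∧ i ∣ n) ↔ (∃ j : Int, 2 ≤ j ∧ j * j ≤ n ∧ j ∣ n) := by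
  constructor
  · rintro ⟨i, h2i, hin, k, hk⟩
    by_cases hii : i * i ≤ n
    · exact ⟨i, h2i, hii, ⟨k, hk⟩⟩
    · have hkpos : 1 ≤ k := by nlinarith
      have hk2 : 2 ≤ k := by nlinarith
      have hlt : k < i := by nlinarith
      have hkk : k * k ≤ n := by nlinarith
      exact ⟨k, hk2, hkk, ⟨i, by rw [hk]; ring⟩⟩
  · rintro ⟨j, h2j, hjj, hdvd⟩
    have hlt : j < n := by nlinarith
    exact ⟨j, h2j, hlt, hdvd⟩

theorem check_eq (n : Int) : (!decide (n ≤ 1) && !pyAnyDiv n) = bIsPrime n := by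
  by_cases hn : n ≤ 1
  · simp [bIsPrime, hn]
  · have hn2 : 2 ≤ n := by omega
    simp only [bIsPrime, if_neg hn]
    have hd1 : decide (n ≤ 1) = false := by simp [hn]
    rw [hd1]
    simp only [Bool.not_false, Bool.true_and]
    have hiff : pyAnyDiv n = true ↔ ¬ (bTrial n 2 = true) := by
      rw [pyAnyDiv_iff, bTrial_iff n 2 le_rfl, divisor_small n hn2]
      constructor
      · rintro ⟨j, h2, hjj, hd⟩ hall; exact hall j h2 hjj hd
      · intro h; by_contra hex
        exact h (fun j h2 hjj hd => hex ⟨j, h2, hjj, hd⟩)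
    cases hb : bTrial n 2 <;> cases hp : pyAnyDiv n <;> simp_all

theorem foldl_primes (l : List Int) (acc : List Int) :
    l.foldl (fun primes number =>
      if number ≤ 1 then primes
      else if pyAnyDiv number then primes
      else primes ++ [number]) acc
    = acc ++ l.filter (fun m => !decide (m ≤ 1) && !pyAnyDiv m) := by
  induction l generalizing acc with
  | nil => simp
  | cons x xs ih =>
    simp only [List.foldl_cons, List.filter_cons]
    by_cases h1 : x ≤ 1
    · simp [h1, ih]
    · by_cases h2 : pyAnyDiv x
      · simp [h1, h2, ih]
      · simp [h1, h2, ih]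

-- ===== VERDICT (by name: the statement is the Claim_ definition above) =====
theorem even_odd_prime_spec : Claim_equal_even_odd_prime := by
  intro numbers type_of_out _
  unfold Spec_even_odd_prime even_odd_prime even_odd_prime_alt
  split_ifs with h1 h2 h3
  · rfl
  · rfl
  · simp only [Option.some_inj]
    rw [foldl_primes, List.nil_append]
    exact List.filter_congr (fun x _ => check_eq x)
  · rfl
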